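-- pv_equiv track=rewrite | github.com/cfreis/conect | listaMaquinas.py | ordenaIp
-- ===== SOURCE A (Python) =====
-- def ordenaIp(ipAnt):
--     #coloca os ips na ordem Interno, Externo e URL se existirem
--     ipNew=['','','']
--     idx=1
--     for idx in range(0,len(ipAnt)):
--         if ipAnt[idx][0:3] == '10.':
--             ipNew[0]=ipAnt[idx]
--         elif ipAnt[idx][0:3] == '177':
--             ipNew[1]=ipAnt[idx]
--         else :
--             ipNew[2]=ipAnt[idx]
--     return(ipNew)
-- ===== SOURCE B (Python) =====
-- def ordenaIp(ipAnt):
--     # three independent last-match searches instead of one overwrite loop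
--     def last(pred):
--         for ip in reversed(ipAnt):
--             if pred(ip[0:3]):
--                 return ip
--         return ''
--     return [last(lambda p: p == '10.'),
--             last(lambda p: p == '177'),
--             last(lambda p: p != '10.' and p != '177')]
-- ===== Notes on version B (the rewrite author's own statement) =====
-- stated objective: alternative
-- what changed: Replaces the single mutating overwrite loop with three independent reversed last-match searches, one per result slot.
import Mathlib
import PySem

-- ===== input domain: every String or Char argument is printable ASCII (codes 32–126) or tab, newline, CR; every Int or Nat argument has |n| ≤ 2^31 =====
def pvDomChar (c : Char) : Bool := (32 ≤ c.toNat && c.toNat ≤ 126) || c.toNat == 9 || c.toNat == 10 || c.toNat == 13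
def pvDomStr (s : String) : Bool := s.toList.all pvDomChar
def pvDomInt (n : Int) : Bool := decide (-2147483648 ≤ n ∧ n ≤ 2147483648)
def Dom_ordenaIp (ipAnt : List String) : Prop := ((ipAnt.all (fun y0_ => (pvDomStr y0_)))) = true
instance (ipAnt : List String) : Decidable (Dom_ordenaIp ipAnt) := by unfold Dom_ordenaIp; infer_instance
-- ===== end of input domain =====

-- B replaces A's single overwrite loop with three independent reversed last-match searches (alternative decomposition, same cost).


-- ===== PORT A =====
-- ipAnt[idx][0:3]
def pvPref3 (s : String) : String := PySem.Str.slice s (some 0) (some 3)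

-- loop body: overwrite one of the three slots
def ordenaIpStep (st : String × String × String) (s : String) : String × String × String :=
  if pvPref3 s == "10." then (s, st.2.1, st.2.2)
  else if pvPref3 s == "177" then (st.1, s, st.2.2)
  else (st.1, st.2.1, s)

def ordenaIp (ipAnt : List String) : List String :=
  let st := ipAnt.foldl ordenaIpStep ("", "", "")
  [st.1, st.2.1, st.2.2]

-- ===== PORT B =====
-- last element of the list whose 3-char prefix satisfies p, else ''
def pvLast (p : String → Bool) (l : List String) : String :=
  (l.reverse.find? (fun s => p (pvPref3 s))).getD ""

def ordenaIp_alt (ipAnt : List String) : List String :=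
  [pvLast (fun q => q == "10.") ipAnt,
   pvLast (fun q => q == "177") ipAnt,
   pvLast (fun q => q != "10." && q != "177") ipAnt]

-- ===== PRECONDITION & SPEC =====
def Spec_ordenaIp (ipAnt : List String) (out : List String) : Prop := out = ordenaIp_alt ipAnt
instance (ipAnt : List String) (out : List String) : Decidable (Spec_ordenaIp ipAnt out) := by unfold Spec_ordenaIp; infer_instance

-- ===== CLAIM (what is proved, stated in full; the proofs are below) =====
def Claim_equal_ordenaIp : Prop := ∀ (ipAnt : List String), Dom_ordenaIp ipAnt → Spec_ordenaIp ipAnt (ordenaIp ipAnt)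

-- ===== LEMMAS AND PROOFS =====

theorem pvLast_append (p : String → Bool) (l : List String) (x : String) :
    pvLast p (l ++ [x]) = if p (pvPref3 x) then x else pvLast p l := by
  simp [pvLast, List.find?]
  split_ifs with h <;> simp [h]

theorem comp1 (l : List String) :
    (List.foldl ordenaIpStep ("", "", "") l).1 = pvLast (fun q => q == "10.") l := by
  induction l using List.reverseRecOn with
  | nil => rfl
  | append_singleton l x ih =>
    rw [List.foldl_append, List.foldl_cons, List.foldl_nil, pvLast_append, ← ih]
    generalize List.foldl ordenaIpStep ("", "", "") l = S
    unfold ordenaIpStep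
    split_ifs with h1 h2 <;> simp_all

theorem comp2 (l : List String) :
    (List.foldl ordenaIpStep ("", "", "") l).2.1 = pvLast (fun q => q == "177") l := by
  induction l using List.reverseRecOn with
  | nil => rfl
  | append_singleton l x ih =>
    rw [List.foldl_append, List.foldl_cons, List.foldl_nil, pvLast_append, ← ih]
    generalize List.foldl ordenaIpStep ("", "", "") l = S
    unfold ordenaIpStep
    split_ifs with h1 h2 <;> simp_all

theorem comp3 (l : List String) :
    (List.foldl ordenaIpStep ("", "", "") l).2.2 = pvLast (fun q => q != "10." && q != "177") l := by
  induction l using List.reverseRecOn with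
  | nil => rfl
  | append_singleton l x ih =>
    rw [List.foldl_append, List.foldl_cons, List.foldl_nil, pvLast_append, ← ih]
    generalize List.foldl ordenaIpStep ("", "", "") l = S
    unfold ordenaIpStep
    split_ifs with h1 h2 <;> simp_all

theorem ordenaIp_eq_alt (ipAnt : List String) : ordenaIp ipAnt = ordenaIp_alt ipAnt := by
  simp only [ordenaIp, ordenaIp_alt, comp1, comp2, comp3]

-- ===== VERDICT (by name: the statement is the Claim_ definition above) =====
theorem ordenaIp_spec : Claim_equal_ordenaIp := by
  intro ipAnt _
  unfold Spec_ordenaIp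
  exact ordenaIp_eq_alt ipAnt
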